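-- pv_equiv track=rewrite | github.com/ioannes486/pythonDSA | swea/brute_force/swea_24767_trace/solution.py | trace_sum
-- ===== SOURCE A (Python) =====
-- def trace_sum(N, arr):
--
--     # 맨 가운데에서 시작해보자
--     i = 2
--     j = 2
--
--     # 변수 초기화
--     result = arr[i][j]
--
--     # di, dj설정
--     di = [1, -1, 1, -1]
--     dj = [1, 1, -1, -1]
--
--     # 순회하면서 더하기
--     for repeat in range(1, 3):  # 팔 길이가 2임으로 인덱스는 1,2
--         for d in range(4):
--             ni = i + (di[d] * repeat)
--             nj = j + (dj[d] * repeat)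
--             result += arr[ni][nj]
--
--     return result
-- ===== SOURCE B (Python) =====
-- def trace_sum(N, arr):
--     # Simpler: scan the two main diagonals directly and un-count the shared center once.
--     total = -arr[2][2]
--     for i in range(5):
--         total += arr[i][i] + arr[i][4 - i]
--     return total
-- ===== Notes on version B (the rewrite author's own statement) =====
-- stated objective: simpler
-- what changed: Replaces the center-plus-radius/direction offset loops (di/dj tables, repeat 1..2) with one scan over i in range(5) summing arr[i][i] + arr[i][4-i] and subtracting the doubly-counted center arr[2][2].
import Mathlib
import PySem

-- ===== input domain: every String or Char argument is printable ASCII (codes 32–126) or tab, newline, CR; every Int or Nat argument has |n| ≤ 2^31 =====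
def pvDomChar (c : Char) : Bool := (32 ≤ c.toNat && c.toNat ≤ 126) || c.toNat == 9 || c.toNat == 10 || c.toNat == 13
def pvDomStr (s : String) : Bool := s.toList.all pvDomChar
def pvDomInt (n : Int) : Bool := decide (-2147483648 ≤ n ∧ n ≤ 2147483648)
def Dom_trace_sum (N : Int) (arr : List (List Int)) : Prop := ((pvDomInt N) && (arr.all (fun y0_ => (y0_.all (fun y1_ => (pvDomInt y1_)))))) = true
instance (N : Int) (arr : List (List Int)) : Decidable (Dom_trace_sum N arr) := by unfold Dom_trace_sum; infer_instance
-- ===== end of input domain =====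

-- B replaces the radius-and-direction offset loops with a single scan of the two main diagonals, subtracting the doubly-counted center (objective: simpler).

-- ===== PORT A =====
def trace_sum (N : Int) (arr : List (List Int)) : Int :=
  let i : Int := 2
  let j : Int := 2
  let result : Int := PySem.List.pyGetD (PySem.List.pyGetD arr i []) j 0
  let di : List Int := [1, -1, 1, -1]
  let dj : List Int := [1, 1, -1, -1]
  (PySem.List.pyRange 1 3 1).foldl (fun result rep =>
    (PySem.List.pyRange 0 4 1).foldl (fun result d =>
      let ni := i + (PySem.List.pyGetD di d 0) * rep
      let nj := j + (PySem.List.pyGetD dj d 0) * rep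
      result + PySem.List.pyGetD (PySem.List.pyGetD arr ni []) nj 0) result) result

-- ===== PORT B =====
def trace_sum_alt (N : Int) (arr : List (List Int)) : Int :=
  let total : Int := -(PySem.List.pyGetD (PySem.List.pyGetD arr 2 []) 2 0)
  (PySem.List.pyRange 0 5 1).foldl (fun total i =>
    total + PySem.List.pyGetD (PySem.List.pyGetD arr i []) i 0
          + PySem.List.pyGetD (PySem.List.pyGetD arr i []) (4 - i) 0) total

-- ===== PRECONDITION & SPEC =====
-- Pre_: exactly the inputs where Python A returns (no IndexError): five rows exist and
-- each row is long enough for the diagonal cells A reads in it (cols {0,4},{1,3},{2},{1,3},{0,4}).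
def Pre_trace_sum (N : Int) (arr : List (List Int)) : Prop :=
  5 ≤ arr.length ∧
  5 ≤ (arr.getD 0 []).length ∧ 4 ≤ (arr.getD 1 []).length ∧
  3 ≤ (arr.getD 2 []).length ∧ 4 ≤ (arr.getD 3 []).length ∧
  5 ≤ (arr.getD 4 []).length
instance (N : Int) (arr : List (List Int)) : Decidable (Pre_trace_sum N arr) := by unfold Pre_trace_sum; infer_instance
def pvWitness_trace_sum : Int × List (List Int) :=
  (5, [[1,2,3,4,5],[6,7,8,9,10],[11,12,13,14,15],[16,17,18,19,20],[21,22,23,24,25]])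

def Spec_trace_sum (N : Int) (arr : List (List Int)) (out : Int) : Prop := out = trace_sum_alt N arr
instance (N : Int) (arr : List (List Int)) (out : Int) : Decidable (Spec_trace_sum N arr out) := by unfold Spec_trace_sum; infer_instance

-- ===== CLAIM (what is proved, stated in full; the proofs are below) =====
def Claim_equal_trace_sum : Prop := ∀ (N : Int) (arr : List (List Int)), Dom_trace_sum N arr → Pre_trace_sum N arr → Spec_trace_sum N arr (trace_sum N arr)

-- ===== LEMMAS AND PROOFS =====

-- ===== VERDICT (by name: the statement is the Claim_ definition above) =====
theorem trace_sum_spec : Claim_equal_trace_sum := by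
  intro N arr _ _
  unfold Spec_trace_sum trace_sum trace_sum_alt
  have h1 : PySem.List.pyRange 1 3 1 = [1, 2] := by decide
  have h2 : PySem.List.pyRange 0 4 1 = [0, 1, 2, 3] := by decide
  have h3 : PySem.List.pyRange 0 5 1 = [0, 1, 2, 3, 4] := by decide
  rw [h1, h2, h3]
  simp [List.foldl, PySem.List.pyGetD, PySem.List.pyGet?, PySem.List.pyIdx?]
  ring
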